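-- pv_equiv track=rewrite | github.com/AllenZPGu/MDSCPuzzles | MDSCProj/MDSCApp/utils.py | capitaliseAfterSpace
-- ===== SOURCE A (Python) =====
-- import string
--
-- def capitaliseAfterSpace(x):
--     if len(x) == 0:
--         return ''
--     x = x.lower()
--     y = x[0].upper()
--     for i in range(1, len(x)):
--         if x[i-1] not in string.ascii_uppercase+string.ascii_lowercase:
--             y += x[i].upper()
--         else:
--             y += x[i]
--     return y
-- ===== SOURCE B (Python) =====
-- def capitaliseAfterSpace(x):
--     return x.title()
-- ===== Notes on version B (the rewrite author's own statement) =====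
-- stated objective: idiomatic
-- what changed: The explicit lowercase-then-index-loop with a previous-character letter test is replaced by a single call to str.title(), whose word-boundary titlecasing performs exactly this capitalisation on the ASCII domain.
import Mathlib
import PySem

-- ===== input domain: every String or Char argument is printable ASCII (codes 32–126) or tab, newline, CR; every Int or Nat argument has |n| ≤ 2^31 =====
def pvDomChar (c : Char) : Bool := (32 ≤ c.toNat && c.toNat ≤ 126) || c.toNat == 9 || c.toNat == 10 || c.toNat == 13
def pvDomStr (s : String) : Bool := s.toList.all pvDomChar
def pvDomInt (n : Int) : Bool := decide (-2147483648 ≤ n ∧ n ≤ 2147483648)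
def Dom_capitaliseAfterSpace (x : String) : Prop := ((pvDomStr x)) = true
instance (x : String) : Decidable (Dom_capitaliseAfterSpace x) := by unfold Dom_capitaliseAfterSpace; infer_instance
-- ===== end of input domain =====

-- B replaces A's lowercase-then-index-loop by a single str.title() call (idiomatic one-liner);
-- the title() port below is exact on the ASCII input domain stated above.

-- ===== PORT A =====
-- string.ascii_uppercase + string.ascii_lowercase, as the list of its characters
def pvLetters : List Char :=
  ['A','B','C','D','E','F','G','H','I','J','K','L','M','N','O','P','Q','R','S','T','U','V','W','X','Y','Z',
   'a','b','c','d','e','f','g','h','i','j','k','l','m','n','o','p','q','r','s','t','u','v','w','x','y','z']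

def capitaliseAfterSpace (x : String) : String :=
  if PySem.Str.len x == 0 then "" else
    -- x = x.lower()
    let xl := PySem.Chars.lower x.toList
    -- y = x[0].upper()  (index 0 of a nonempty string never raises: pyGetD with an unused default)
    let y0 := [PySem.Chars.upperChar (PySem.List.pyGetD xl 0 ' ')]
    -- for i in range(1, len(x)): …  ('x[i-1] in <letters>' on a 1-char slice = list membership)
    let y := (PySem.List.pyRange 1 (PySem.List.len xl)).foldl (fun y i =>
      if pvLetters.contains (PySem.List.pyGetD xl (i - 1) ' ') = false then
        y ++ [PySem.Chars.upperChar (PySem.List.pyGetD xl i ' ')]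
      else
        y ++ [PySem.List.pyGetD xl i ' ']) y0
    String.ofList y

-- ===== PORT B =====
-- str.title(): each character is lowercased if the previous character is cased, else titlecased;
-- on the ASCII domain 'cased' is isalpha and titlecase is upperChar (exact there).
def pvTitleChars : Bool → List Char → List Char
  | _, [] => []
  | prevCased, c :: cs =>
      (if prevCased then PySem.Chars.lowerChar c else PySem.Chars.upperChar c)
        :: pvTitleChars (PySem.Chars.isalpha c) cs

def capitaliseAfterSpace_alt (x : String) : String :=
  String.ofList (pvTitleChars false x.toList)

-- ===== PRECONDITION & SPEC =====
def Spec_capitaliseAfterSpace (x : String) (out : String) : Prop := out = capitaliseAfterSpace_alt x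
instance (x : String) (out : String) : Decidable (Spec_capitaliseAfterSpace x out) := by unfold Spec_capitaliseAfterSpace; infer_instance

-- ===== CLAIM (what is proved, stated in full; the proofs are below) =====
def Claim_equal_capitaliseAfterSpace : Prop := ∀ (x : String), Dom_capitaliseAfterSpace x → Spec_capitaliseAfterSpace x (capitaliseAfterSpace x)

-- ===== LEMMAS AND PROOFS =====

lemma char_eq_of_toNat_eq {c d : Char} (h : c.toNat = d.toNat) : c = d := by
  have h1 := Char.ofNat_toNat c
  have h2 := Char.ofNat_toNat d
  rw [h] at h1; rw [← h1, h2]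

lemma toNat_ofNat_small {n : Nat} (h : n < 55296) : (Char.ofNat n).toNat = n := by
  rw [Char.toNat_ofNat, if_pos (by unfold Nat.isValidChar; omega)]

lemma isupper_iff (c : Char) : PySem.Chars.isupper c = true ↔ 65 ≤ c.toNat ∧ c.toNat ≤ 90 := by
  simp only [PySem.Chars.isupper, Bool.and_eq_true, decide_eq_true_iff]; exact Iff.rfl

lemma islower_iff (c : Char) : PySem.Chars.islower c = true ↔ 97 ≤ c.toNat ∧ c.toNat ≤ 122 := by
  simp only [PySem.Chars.islower, Bool.and_eq_true, decide_eq_true_iff]; exact Iff.rfl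

lemma isalpha_iff (c : Char) : PySem.Chars.isalpha c = true ↔ (65 ≤ c.toNat ∧ c.toNat ≤ 90) ∨ (97 ≤ c.toNat ∧ c.toNat ≤ 122) := by
  simp only [PySem.Chars.isalpha, Bool.or_eq_true, isupper_iff, islower_iff]

lemma lowerChar_of_upper {c : Char} (h : 65 ≤ c.toNat ∧ c.toNat ≤ 90) :
    PySem.Chars.lowerChar c = Char.ofNat (c.toNat + 32) := by
  unfold PySem.Chars.lowerChar; rw [if_pos ((isupper_iff c).mpr h)]

lemma lowerChar_of_not_upper {c : Char} (h : ¬ (65 ≤ c.toNat ∧ c.toNat ≤ 90)) :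
    PySem.Chars.lowerChar c = c := by
  unfold PySem.Chars.lowerChar
  rw [if_neg (fun hh => h ((isupper_iff c).mp hh))]

lemma toNat_lowerChar_of_upper {c : Char} (h : 65 ≤ c.toNat ∧ c.toNat ≤ 90) :
    (PySem.Chars.lowerChar c).toNat = c.toNat + 32 := by
  rw [lowerChar_of_upper h, toNat_ofNat_small (by omega)]

lemma isalpha_lowerChar (c : Char) :
    PySem.Chars.isalpha (PySem.Chars.lowerChar c) = PySem.Chars.isalpha c := by
  rw [Bool.eq_iff_iff, isalpha_iff, isalpha_iff]
  by_cases h : 65 ≤ c.toNat ∧ c.toNat ≤ 90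
  · rw [toNat_lowerChar_of_upper h]; omega
  · rw [lowerChar_of_not_upper h]

lemma upperChar_lowerChar (c : Char) :
    PySem.Chars.upperChar (PySem.Chars.lowerChar c) = PySem.Chars.upperChar c := by
  by_cases h : 65 ≤ c.toNat ∧ c.toNat ≤ 90
  · unfold PySem.Chars.upperChar
    rw [if_pos ((islower_iff _).mpr (by rw [toNat_lowerChar_of_upper h]; omega)),
        if_neg (fun hh => by have := (islower_iff c).mp hh; omega)]
    apply char_eq_of_toNat_eq
    rw [toNat_ofNat_small (by have := toNat_lowerChar_of_upper h; omega)]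
    rw [toNat_lowerChar_of_upper h]
    omega
  · rw [lowerChar_of_not_upper h]

lemma contains_pvLetters (c : Char) : pvLetters.contains c = PySem.Chars.isalpha c := by
  rw [Bool.eq_iff_iff, List.contains_iff_mem, isalpha_iff]
  have hmap : pvLetters.map Char.toNat =
      [65,66,67,68,69,70,71,72,73,74,75,76,77,78,79,80,81,82,83,84,85,86,87,88,89,90,
       97,98,99,100,101,102,103,104,105,106,107,108,109,110,111,112,113,114,115,116,117,118,119,120,121,122] := by
    decide
  constructor
  · intro h
    have : c.toNat ∈ pvLetters.map Char.toNat := List.mem_map_of_mem h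
    rw [hmap] at this
    simp only [List.mem_cons, List.not_mem_nil, or_false] at this
    omega
  · intro h
    have : c.toNat ∈ pvLetters.map Char.toNat := by
      rw [hmap]; simp only [List.mem_cons, List.not_mem_nil, or_false]; omega
    obtain ⟨d, hd, he⟩ := List.mem_map.mp this
    rw [← char_eq_of_toNat_eq he]; exact hd

lemma pyRange_one (m : Nat) :
    PySem.List.pyRange 1 ((m : Int) + 1) 1 = List.map (fun k : Nat => 1 + (k : Int)) (List.range m) := by
  unfold PySem.List.pyRange
  rcases Nat.eq_zero_or_pos m with rfl | hm
  · norm_num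
  · rw [if_neg (by norm_num), if_pos (by norm_num), if_pos (by exact_mod_cast by omega : (1:Int) < (m:Int)+1)]
    have hc : ((m:Int) + 1) - 1 + 1 - 1 = (m : Int) := by ring
    rw [hc, Int.ediv_one, Int.toNat_natCast]
    exact List.map_congr_left (fun k _ => by ring)

lemma map_range_zip {α β : Type} (l : List α) (d : α) (G : α → α → β) :
    (List.range (l.length - 1)).map (fun k => G (l.getD k d) (l.getD (k+1) d)) =
      List.zipWith G l l.tail := by
  apply List.ext_getElem
  · simp [List.length_zipWith, List.length_tail]
  · intro i h1 h2
    simp only [List.getElem_map, List.getElem_range, List.getElem_zipWith]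
    simp only [List.length_map, List.length_range] at h1
    rw [List.getD_eq_getElem l d (by omega), List.getD_eq_getElem l d (by omega), List.getElem_tail]


lemma zip_eq_title (cs : List Char) : ∀ (p : Char),
    List.zipWith (fun a b =>
        if PySem.Chars.isalpha a then PySem.Chars.lowerChar b else PySem.Chars.upperChar b)
      (p :: cs) cs = pvTitleChars (PySem.Chars.isalpha p) cs := by
  induction cs with
  | nil => intro p; rfl
  | cons c cs ih =>
    intro p
    simp only [List.zipWith_cons_cons, pvTitleChars]
    exact congrArg _ (ih c)

theorem capitaliseAfterSpace_spec : Claim_equal_capitaliseAfterSpace := by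
  intro x _
  unfold Spec_capitaliseAfterSpace capitaliseAfterSpace capitaliseAfterSpace_alt
  rcases hx : x.toList with _ | ⟨c, cs⟩
  · simp only [PySem.Str.len, hx, List.length_nil, Nat.cast_zero, beq_self_eq_true, if_pos]
    rfl
  · simp only [PySem.Str.len, hx, List.length_cons]
    rw [if_neg (by simp; omega)]
    simp only [PySem.Chars.lower, List.map_cons, PySem.List.len, List.length_cons, List.length_map]
    congr 1
    -- head element
    have h0 : PySem.List.pyGetD (PySem.Chars.lowerChar c :: List.map PySem.Chars.lowerChar cs) 0 ' '
        = PySem.Chars.lowerChar c := by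
      simp [PySem.List.pyGetD, PySem.List.pyGet?, PySem.List.pyIdx?]
    rw [h0]
    -- fold body: move the if inside the appended singleton
    have hbody :
        (fun (y : List Char) (i : Int) =>
          if (pvLetters.contains (PySem.List.pyGetD (PySem.Chars.lowerChar c :: List.map PySem.Chars.lowerChar cs) (i - 1) ' ')) = false then
            y ++ [PySem.Chars.upperChar (PySem.List.pyGetD (PySem.Chars.lowerChar c :: List.map PySem.Chars.lowerChar cs) i ' ')]
          else
            y ++ [PySem.List.pyGetD (PySem.Chars.lowerChar c :: List.map PySem.Chars.lowerChar cs) i ' ']) =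
        (fun (y : List Char) (i : Int) =>
          y ++ [if (pvLetters.contains (PySem.List.pyGetD (PySem.Chars.lowerChar c :: List.map PySem.Chars.lowerChar cs) (i - 1) ' ')) = false then
            PySem.Chars.upperChar (PySem.List.pyGetD (PySem.Chars.lowerChar c :: List.map PySem.Chars.lowerChar cs) i ' ')
          else PySem.List.pyGetD (PySem.Chars.lowerChar c :: List.map PySem.Chars.lowerChar cs) i ' ']) := by
      funext y i; split_ifs <;> rfl
    rw [show ((cs.length + 1 : Nat) : Int) = ((cs.length : Int) + 1) by push_cast; ring]
    rw [pyRange_one, hbody, PySem.List.foldl_append_singleton_eq_map, List.map_map]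
    have hcg : List.map
        ((fun i =>
            if pvLetters.contains (PySem.List.pyGetD (PySem.Chars.lowerChar c :: List.map PySem.Chars.lowerChar cs) (i - 1) ' ') = false then
              PySem.Chars.upperChar (PySem.List.pyGetD (PySem.Chars.lowerChar c :: List.map PySem.Chars.lowerChar cs) i ' ')
            else PySem.List.pyGetD (PySem.Chars.lowerChar c :: List.map PySem.Chars.lowerChar cs) i ' ')
          ∘ (fun k : Nat => 1 + (k : Int))) (List.range cs.length) =
        List.map (fun k : Nat =>
          if pvLetters.contains ((PySem.Chars.lowerChar c :: List.map PySem.Chars.lowerChar cs).getD k ' ') = false then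
            PySem.Chars.upperChar ((PySem.Chars.lowerChar c :: List.map PySem.Chars.lowerChar cs).getD (k+1) ' ')
          else (PySem.Chars.lowerChar c :: List.map PySem.Chars.lowerChar cs).getD (k+1) ' ')
          (List.range cs.length) := by
      apply List.map_congr_left
      intro k _
      have e1 : (1 + (k:Int)) - 1 = ((k : Nat) : Int) := by ring
      have e2 : (1 + (k:Int)) = (((k+1) : Nat) : Int) := by push_cast; ring
      simp only [Function.comp_apply]
      rw [e1, e2]
      simp only [PySem.List.pyGetD_natCast]
    rw [hcg]
    rw [show cs.length = (PySem.Chars.lowerChar c :: List.map PySem.Chars.lowerChar cs).length - 1 by simp]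
    rw [map_range_zip (PySem.Chars.lowerChar c :: List.map PySem.Chars.lowerChar cs) ' '
          (fun a b => if pvLetters.contains a = false then PySem.Chars.upperChar b else b)]
    rw [show (PySem.Chars.lowerChar c :: List.map PySem.Chars.lowerChar cs) = List.map PySem.Chars.lowerChar (c :: cs) from rfl,
        show (List.map PySem.Chars.lowerChar (c :: cs)).tail = List.map PySem.Chars.lowerChar cs from rfl]
    rw [List.zipWith_map]
    have hfun : (fun (a b : Char) =>
        if pvLetters.contains (PySem.Chars.lowerChar a) = false then
          PySem.Chars.upperChar (PySem.Chars.lowerChar b) else PySem.Chars.lowerChar b) =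
        (fun a b => if PySem.Chars.isalpha a then PySem.Chars.lowerChar b else PySem.Chars.upperChar b) := by
      funext a b
      rw [contains_pvLetters, isalpha_lowerChar]
      cases hA : PySem.Chars.isalpha a <;> simp [upperChar_lowerChar]
    rw [hfun, zip_eq_title, upperChar_lowerChar]
    rfl
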